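-- pv_equiv track=rewrite | github.com/Fusyong/ai-proofread | src/markdown_splitter.py | split_markdown_by_title
-- ===== SOURCE A (Python) =====
-- from typing import List
--
-- def split_markdown_by_title(text: str, levels: list[int]=[2]) -> List[str]:
--     """
--     将markdown文本按标题级别切分
--
--     Args:
--         text (str): markdown文本
--         levels (list[int]): 要切分的标题级别列表
--
--     Returns:
--         List[str]: 按标题切分的文本列表
--     """
--     # 按行分割文本
--     lines = text.splitlines()
--
--     # 存储切分后的段落
--     raw_paragraphs = []
--     current_paragraph = []
--
--     for line in lines:
--         # 检查是否为要切分的标题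
--         is_title_to_cut = False
--         for l in levels:
--             if line.startswith(f"{'#' * l} "):
--                 is_title_to_cut = True
--                 break
--
--         if is_title_to_cut:
--             # 如果当前段落不为空，添加到结果中
--             if current_paragraph:
--                 raw_paragraphs.append('\n'.join(current_paragraph))
--                 current_paragraph = []
--
--             # 将当前标题行添加到新段落
--             current_paragraph.append(line)
--         else:
--             # 将当前行添加到当前段落
--             current_paragraph.append(line)
--
--     # 添加最后一个段落（如果存在）
--     if current_paragraph:
--         raw_paragraphs.append('\n'.join(current_paragraph))
--
--     return raw_paragraphs
-- ===== SOURCE B (Python) =====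
-- def split_markdown_by_title(text, levels=[2]):
--     lines = text.splitlines()
--     cuts = [i for i, line in enumerate(lines)
--             if any(line.startswith('#' * l + ' ') for l in levels)]
--     bounds = [0] + cuts + [len(lines)]
--     return ['\n'.join(lines[a:b])
--             for a, b in zip(bounds, bounds[1:]) if a < b]
-- ===== Notes on version B (the rewrite author's own statement) =====
-- stated objective: alternative
-- what changed: Replaces the running current-paragraph accumulator with a two-phase decomposition: one scan collects the indices of cut-title lines, then the segments are rebuilt by slicing the line list between consecutive boundaries and joining each nonempty slice.
import Mathlib
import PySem

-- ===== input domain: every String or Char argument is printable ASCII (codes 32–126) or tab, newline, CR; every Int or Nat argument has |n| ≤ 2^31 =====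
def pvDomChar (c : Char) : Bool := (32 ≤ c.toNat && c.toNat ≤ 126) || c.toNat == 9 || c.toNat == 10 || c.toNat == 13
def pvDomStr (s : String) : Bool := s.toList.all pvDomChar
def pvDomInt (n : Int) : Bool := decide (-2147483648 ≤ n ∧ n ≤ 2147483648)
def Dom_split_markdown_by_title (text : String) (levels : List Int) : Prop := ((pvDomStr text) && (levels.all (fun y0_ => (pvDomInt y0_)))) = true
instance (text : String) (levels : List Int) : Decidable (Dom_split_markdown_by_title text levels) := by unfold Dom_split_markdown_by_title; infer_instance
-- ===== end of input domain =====

-- B replaces A's running current-paragraph accumulator with a two-phase decomposition: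
-- collect the indices of cut-title lines, then rebuild the segments by slicing between
-- consecutive boundaries (objective: alternative; no speed claim).

-- ===== PORT A =====
-- exact for `line.startswith('#' * l + ' ')` (called with n = l.toNat; Python's '#'*l is
-- empty for l ≤ 0, which toNat matches): checks n leading '#' then one ' ' without
-- materializing the prefix string.
def pvStartsHashSpace : List Char → Nat → Bool
  | ' ' :: _, 0 => true
  | _, 0 => false
  | c :: cs, n+1 => c == '#' && pvStartsHashSpace cs n
  | [], _+1 => false

-- the inner `for l in levels: if line.startswith(...): break` flag loop
def pvIsCut (levels : List Int) (line : String) : Bool :=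
  levels.any (fun l => pvStartsHashSpace line.toList l.toNat)

def split_markdown_by_title (text : String) (levels : List Int) : List String :=
  let lines := PySem.Str.splitlines text
  let st := lines.foldl
    (fun (st : List String × List String) line =>
      if pvIsCut levels line then
        if st.2.isEmpty then (st.1, [line])
        else (st.1 ++ [PySem.Str.join "\n" st.2], [line])
      else (st.1, st.2 ++ [line]))
    ([], [])
  if st.2.isEmpty then st.1 else st.1 ++ [PySem.Str.join "\n" st.2]

-- ===== PORT B =====
def split_markdown_by_title_alt (text : String) (levels : List Int) : List String :=
  let lines := PySem.Str.splitlines text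
  let cuts : List Int := (PySem.List.enumerate lines 0).filterMap
    (fun iv => if pvIsCut levels iv.2 then some iv.1 else none)
  let bounds : List Int := 0 :: cuts ++ [(lines.length : Int)]
  (bounds.zip bounds.tail).filterMap
    (fun ab => if ab.1 < ab.2 then
        some (PySem.Str.join "\n" (PySem.List.slice lines (some ab.1) (some ab.2)))
      else none)

-- ===== PRECONDITION & SPEC =====
def Spec_split_markdown_by_title (text : String) (levels : List Int) (out : List String) : Prop := out = split_markdown_by_title_alt text levels
instance (text : String) (levels : List Int) (out : List String) : Decidable (Spec_split_markdown_by_title text levels out) := by unfold Spec_split_markdown_by_title; infer_instance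

-- ===== CLAIM (what is proved, stated in full; the proofs are below) =====
def Claim_equal_split_markdown_by_title : Prop := ∀ (text : String) (levels : List Int), Dom_split_markdown_by_title text levels → Spec_split_markdown_by_title text levels (split_markdown_by_title text levels)

-- ===== LEMMAS AND PROOFS =====

-- canonical chunking of the line list at cut lines (head of every later chunk is a cut)
def pvChunksGo {α : Type} (p : α → Bool) : List α → List (List α)
  | [] => []
  | x :: xs =>
    (x :: xs.takeWhile (fun y => !p y)) :: pvChunksGo p (xs.dropWhile (fun y => !p y))
termination_by ls => ls.length
decreasing_by
  simp only [List.length_cons]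
  exact Nat.lt_succ_of_le (List.length_dropWhile_le _ _)

def pvChunks {α : Type} (p : α → Bool) (ls : List α) : List (List α) :=
  (if ls.takeWhile (fun y => !p y) = [] then [] else [ls.takeWhile (fun y => !p y)]) ++
    pvChunksGo p (ls.dropWhile (fun y => !p y))

-- A-side recursion (the foldl state, with the final flush applied)
def pvRunA {α : Type} (p : α → Bool) : List α → List α → List (List α)
  | [], cur => if cur.isEmpty then [] else [cur]
  | x :: xs, cur =>
    if p x then
      if cur.isEmpty then pvRunA p xs [x] else cur :: pvRunA p xs [x]
    else pvRunA p xs (cur ++ [x])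

-- B-side recursion: consecutive boundary pairs, keep nonempty slices
def pvP {α : Type} (ls : List α) : List Nat → List (List α)
  | [] => []
  | [_] => []
  | a :: b :: rest =>
    (if a < b then [(ls.drop a).take (b - a)] else []) ++ pvP ls (b :: rest)

-- Nat-level cut positions
def pvCuts {α : Type} (p : α → Bool) : List α → List Nat
  | [] => []
  | x :: xs =>
    if p x then 0 :: (pvCuts p xs).map (· + 1) else (pvCuts p xs).map (· + 1)

theorem pvChunksGo_cons {α : Type} (p : α → Bool) (x : α) (xs : List α) :
    pvChunksGo p (x :: xs) =
      (x :: xs.takeWhile (fun y => !p y)) :: pvChunksGo p (xs.dropWhile (fun y => !p y)) := by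
  rw [pvChunksGo.eq_def]

theorem pvRunA_eq {α : Type} (p : α → Bool) (ls : List α) : ∀ cur,
    pvRunA p ls cur =
      (if (cur ++ ls.takeWhile (fun y => !p y)).isEmpty then []
        else [cur ++ ls.takeWhile (fun y => !p y)]) ++
      pvChunksGo p (ls.dropWhile (fun y => !p y)) := by
  induction ls with
  | nil => intro cur; simp [pvRunA, pvChunksGo]
  | cons x xs ih =>
    intro cur
    by_cases h : p x
    · have e1 : List.takeWhile (fun y => !p y) (x :: xs) = [] := by simp [h]
      have e2 : List.dropWhile (fun y => !p y) (x :: xs) = x :: xs := by simp [h]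
      rw [e1, e2, pvChunksGo_cons]
      simp only [pvRunA, h, ite_true, List.append_nil]
      rw [ih [x]]
      simp only [List.isEmpty_cons, Bool.false_eq_true, ite_false, List.singleton_append]
      by_cases hc : cur.isEmpty
      · simp [List.isEmpty_iff.mp hc]
      · simp [hc]
    · have e1 : List.takeWhile (fun y => !p y) (x :: xs) =
          x :: List.takeWhile (fun y => !p y) xs := by simp [h]
      have e2 : List.dropWhile (fun y => !p y) (x :: xs) =
          List.dropWhile (fun y => !p y) xs := by simp [h]
      rw [e1, e2]
      simp only [pvRunA, h, Bool.false_eq_true, ite_false]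
      rw [ih (cur ++ [x])]
      simp [List.append_assoc]
theorem pvFoldA_eq {α : Type} (p : α → Bool) (j : List α → α) (ls : List α) :
    ∀ raw cur,
    (let st := ls.foldl
      (fun (st : List α × List α) line =>
        if p line then
          if st.2.isEmpty then (st.1, [line])
          else (st.1 ++ [j st.2], [line])
        else (st.1, st.2 ++ [line])) (raw, cur)
     if st.2.isEmpty then st.1 else st.1 ++ [j st.2]) =
      raw ++ (pvRunA p ls cur).map j := by
  induction ls with
  | nil =>
    intro raw cur
    simp only [List.foldl_nil, pvRunA]
    by_cases hc : cur.isEmpty <;> simp [hc]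
  | cons x xs ih =>
    intro raw cur
    simp only [List.foldl_cons, pvRunA]
    by_cases h : p x
    · by_cases hc : cur.isEmpty
      · simp only [h, hc, ite_true, ih]
      · simp only [h, hc, ite_true, Bool.false_eq_true, ite_false, ih, List.map_cons]
        simp [List.append_assoc]
    · simp only [h, Bool.false_eq_true, ite_false, ih]
theorem pvCuts_nil_of {α : Type} (p : α → Bool) (ls : List α)
    (h : ∀ x ∈ ls, p x = false) : pvCuts p ls = [] := by
  induction ls with
  | nil => rfl
  | cons x xs ih =>
    simp only [pvCuts, h x (by simp), Bool.false_eq_true, ite_false,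
      ih (fun y hy => h y (by simp [hy])), List.map_nil]
theorem pvCuts_append {α : Type} (p : α → Bool) (t ls : List α)
    (h : ∀ x ∈ t, p x = false) :
    pvCuts p (t ++ ls) = (pvCuts p ls).map (· + t.length) := by
  induction t with
  | nil => simp
  | cons x xs ih =>
    simp only [List.cons_append, pvCuts, h x (by simp), Bool.false_eq_true, ite_false,
      ih (fun y hy => h y (by simp [hy])), List.map_map, List.length_cons]
    apply List.map_congr_left; intro a _; simp; omega
theorem pvP_shift {α : Type} (t ls : List α) : ∀ (bs : List Nat),
    pvP (t ++ ls) (bs.map (· + t.length)) = pvP ls bs := by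
  intro bs
  induction bs with
  | nil => rfl
  | cons a rest ih =>
    cases rest with
    | nil => rfl
    | cons b rest' =>
      simp only [List.map_cons, pvP] at *
      rw [ih]
      congr 2
      · simp only [Nat.add_lt_add_iff_right]
      · rw [List.drop_append]
        simp only [List.drop_of_length_le (by omega : t.length ≤ a + t.length),
          List.nil_append, Nat.add_sub_add_right, Nat.add_sub_cancel]
theorem pvHead_dropWhile {α : Type} (q : α → Bool) : ∀ (ls : List α) (z : α) (zs : List α),
    ls.dropWhile q = z :: zs → q z = false := by
  intro ls
  induction ls with
  | nil => intro z zs h; simp at h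
  | cons x xs ih =>
    intro z zs h
    by_cases hq : q x
    · simp only [List.dropWhile_cons, hq, ite_true] at h
      exact ih z zs h
    · simp only [List.dropWhile_cons, hq, Bool.false_eq_true, ite_false] at h
      cases h
      simpa using hq

theorem pvP_cuts_go_fuel {α : Type} (p : α → Bool) : ∀ (n : Nat) (ys : List α) (y : α),
    ys.length ≤ n → p y = true →
    pvP (y :: ys) (pvCuts p (y :: ys) ++ [ys.length + 1]) = pvChunksGo p (y :: ys) := by
  intro n
  induction n with
  | zero =>
    intro ys y hlen hp
    have : ys = [] := List.length_eq_zero_iff.mp (Nat.le_zero.mp hlen)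
    subst this
    simp [pvP, pvCuts, hp, pvChunksGo]
  | succ n ih =>
    intro ys y hlen hp
    have hsplit : List.takeWhile (fun z => !p z) ys ++ List.dropWhile (fun z => !p z) ys = ys :=
      List.takeWhile_append_dropWhile
    have hts : ∀ x ∈ List.takeWhile (fun z => !p z) ys, p x = false := by
      intro x hx
      have := List.mem_takeWhile_imp hx
      simpa using this
    rw [pvChunksGo_cons]
    cases hr : List.dropWhile (fun z => !p z) ys with
    | nil =>
      have hys : List.takeWhile (fun z => !p z) ys = ys := by
        rw [hr] at hsplit; simpa using hsplit
      have hcys : pvCuts p ys = [] := by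
        apply pvCuts_nil_of
        intro x hx
        exact hts x (by rw [hys]; exact hx)
      have e : pvCuts p (y :: ys) = [0] := by simp [pvCuts, hp, hcys]
      rw [e, hys]
      simp only [List.cons_append, List.nil_append, pvP, Nat.zero_lt_succ, ite_true,
        List.drop_zero, Nat.sub_zero, pvChunksGo, List.append_nil]
      rw [List.take_of_length_le (by simp)]
    | cons z zs =>
      have hz : p z = true := by
        have := pvHead_dropWhile (fun z => !p z) ys z zs hr
        simpa using this
      have hcys : pvCuts p ys = (pvCuts p (z :: zs)).map (· + (List.takeWhile (fun z => !p z) ys).length) := by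
        conv_lhs => rw [← hsplit, hr]
        exact pvCuts_append p _ _ hts
      set t2 := List.takeWhile (fun z => !p z) ys with ht2
      have hyslen : ys.length = t2.length + 1 + zs.length := by
        conv_lhs => rw [← hsplit, hr]
        simp [List.length_append]
        omega
      have hbounds : pvCuts p (y :: ys) ++ [ys.length + 1] =
          0 :: (t2.length + 1) ::
            ((pvCuts p (z :: zs) ++ [zs.length + 1]).tail).map (· + (t2.length + 1)) := by
        simp only [pvCuts, hp, ite_true, hcys, hz, List.map_cons, List.map_map,
          List.map_append, List.cons_append, List.tail_cons]
        refine congrArg₂ _ rfl (congrArg₂ _ (by omega) ?_)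
        simp only [List.map_nil]
        have hfun : ((fun x => x + 1) ∘ (fun x => x + t2.length) ∘ fun x => x + 1) =
            ((fun x => x + (t2.length + 1)) ∘ fun x => x + 1) := by
          funext a; simp only [Function.comp_apply]; omega
        rw [hfun]
        congr 1
        simp only [List.cons.injEq, and_true]
        omega
      rw [hbounds]
      have hsplit2 : y :: ys = (y :: t2) ++ (z :: zs) := by
        simp only [List.cons_append]
        rw [← hsplit, hr]
      simp only [pvP, Nat.zero_lt_succ, ite_true, List.drop_zero, List.singleton_append]
      have hfirst : List.take (t2.length + 1 - 0) (y :: ys) = y :: t2 := by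
        rw [hsplit2]
        simp only [Nat.sub_zero]
        have : t2.length + 1 = (y :: t2).length := by simp
        rw [this, List.take_left]
      rw [hfirst]
      have hmap : (t2.length + 1) ::
            ((pvCuts p (z :: zs) ++ [zs.length + 1]).tail).map (· + (t2.length + 1)) =
          (pvCuts p (z :: zs) ++ [zs.length + 1]).map (· + (y :: t2).length) := by
        simp only [pvCuts, hz, ite_true, List.cons_append, List.tail_cons, List.map_cons,
          List.length_cons]
        congr 1
        omega
      rw [hmap, hsplit2, pvP_shift]
      congr 1
      exact ih zs z (by omega) hz

theorem pvP_cuts_go {α : Type} (p : α → Bool) : ∀ (ys : List α) (y : α), p y = true →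
    pvP (y :: ys) (pvCuts p (y :: ys) ++ [ys.length + 1]) = pvChunksGo p (y :: ys) := by
  intro ys y hp
  exact pvP_cuts_go_fuel p ys.length ys y le_rfl hp

theorem pvP_cuts {α : Type} (p : α → Bool) (ls : List α) :
    pvP ls (0 :: pvCuts p ls ++ [ls.length]) = pvChunks p ls := by
  have hsplit : List.takeWhile (fun z => !p z) ls ++ List.dropWhile (fun z => !p z) ls = ls :=
    List.takeWhile_append_dropWhile
  have hts : ∀ x ∈ List.takeWhile (fun z => !p z) ls, p x = false := by
    intro x hx
    have := List.mem_takeWhile_imp hx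
    simpa using this
  unfold pvChunks
  cases hr : List.dropWhile (fun z => !p z) ls with
  | nil =>
    have hls : List.takeWhile (fun z => !p z) ls = ls := by
      rw [hr] at hsplit; simpa using hsplit
    have hcs : pvCuts p ls = [] := by
      apply pvCuts_nil_of
      intro x hx
      exact hts x (by rw [hls]; exact hx)
    rw [hcs, hls]
    simp only [List.singleton_append, pvChunksGo, List.append_nil]
    by_cases hn : ls = []
    · subst hn
      simp [pvP]
    · rw [if_neg hn]
      simp only [pvP, Nat.sub_zero, List.drop_zero, List.append_nil]
      rw [if_pos (List.length_pos_iff.mpr hn), List.take_of_length_le le_rfl]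
  | cons y ys =>
    have hy : p y = true := by
      have := pvHead_dropWhile (fun z => !p z) ls y ys hr
      simpa using this
    set t := List.takeWhile (fun z => !p z) ls with ht
    have hcs : pvCuts p ls = (pvCuts p (y :: ys)).map (· + t.length) := by
      conv_lhs => rw [← hsplit, hr]
      exact pvCuts_append p _ _ hts
    have hlslen : ls.length = t.length + 1 + ys.length := by
      conv_lhs => rw [← hsplit, hr]
      simp [List.length_append]
      omega
    have hbounds : (0 : Nat) :: pvCuts p ls ++ [ls.length] =
        0 :: ((pvCuts p (y :: ys) ++ [ys.length + 1]).map (· + t.length)) := by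
      simp only [hcs, List.map_append, List.map_cons, List.map_nil, List.cons_append,
        List.cons.injEq, true_and]
      congr 1
      simp only [List.cons.injEq, and_true]
      omega
    have hcons : (pvCuts p (y :: ys) ++ [ys.length + 1]).map (· + t.length) =
        t.length :: ((pvCuts p (y :: ys) ++ [ys.length + 1]).tail).map (· + t.length) := by
      simp only [pvCuts, hy, ite_true, List.cons_append, List.map_cons, List.tail_cons,
        Nat.zero_add]
    rw [hbounds, hcons]
    have hsplit2 : ls = t ++ (y :: ys) := by rw [← hsplit, hr]
    simp only [pvP]
    have htail : t.length :: ((pvCuts p (y :: ys) ++ [ys.length + 1]).tail).map (· + t.length) =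
        (pvCuts p (y :: ys) ++ [ys.length + 1]).map (· + t.length) := hcons.symm
    rw [htail]
    have hshift : pvP ls ((pvCuts p (y :: ys) ++ [ys.length + 1]).map (· + t.length)) =
        pvP (y :: ys) (pvCuts p (y :: ys) ++ [ys.length + 1]) := by
      conv_lhs => rw [hsplit2]
      exact pvP_shift t (y :: ys) _
    rw [hshift, pvP_cuts_go p ys y hy]
    congr 1
    by_cases hn : t = []
    · simp [hn]
    · rw [if_pos (List.length_pos_iff.mpr hn), if_neg hn, Nat.sub_zero,
        List.drop_zero, hsplit2, List.take_left]

theorem pvCutsInt_eq {α : Type} (p : α → Bool) (ls : List α) : ∀ (s : Int),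
    (PySem.List.enumerate ls s).filterMap
      (fun iv => if p iv.2 then some iv.1 else none) =
      (pvCuts p ls).map (fun k : Nat => s + (k : Int)) := by
  induction ls with
  | nil => intro s; simp [PySem.List.enumerate_nil, pvCuts]
  | cons x xs ih =>
    intro s
    simp only [PySem.List.enumerate_cons, List.filterMap_cons, pvCuts]
    by_cases h : p x
    · simp only [h, ite_true, ih (s+1), List.map_cons, List.map_map, Nat.cast_zero, add_zero]
      congr 1
      apply List.map_congr_left
      intro a _
      simp only [Function.comp_apply]
      push_cast
      ring
    · simp only [h, Bool.false_eq_true, ite_false, ih (s+1), List.map_map]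
      apply List.map_congr_left
      intro a _
      simp only [Function.comp_apply]
      push_cast
      ring
theorem pvPInt_eq (lines : List String) : ∀ (bs : List Nat),
    (((bs.map (fun k : Nat => (k : Int))).zip ((bs.map (fun k : Nat => (k : Int))).tail)).filterMap
      (fun ab => if ab.1 < ab.2 then
          some (PySem.Str.join "\n" (PySem.List.slice lines (some ab.1) (some ab.2)))
        else none)) =
      (pvP lines bs).map (PySem.Str.join "\n") := by
  intro bs
  induction bs with
  | nil => rfl
  | cons a rest ih =>
    cases rest with
    | nil => rfl
    | cons b rest' =>
      simp only [List.map_cons, List.tail_cons, List.zip_cons_cons, List.filterMap_cons] at *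
      rw [PySem.List.slice_natCast]
      by_cases h : a < b
      · simp only [pvP, h, ite_true, Nat.cast_lt.mpr h, ih, List.map_cons,
          List.singleton_append]
      · have h2 : ¬ ((a : Int) < (b : Int)) := by exact_mod_cast h
        simp only [pvP, h, h2, ite_false, ih, List.nil_append]
theorem pvRunA_nil_eq {α : Type} (p : α → Bool) (ls : List α) :
    pvRunA p ls [] = pvChunks p ls := by
  rw [pvRunA_eq]
  unfold pvChunks
  simp [List.isEmpty_iff]

-- ===== VERDICT (by name: the statement is the Claim_ definition above) =====
theorem split_markdown_by_title_spec : Claim_equal_split_markdown_by_title := by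
  intro text levels _
  unfold Spec_split_markdown_by_title split_markdown_by_title split_markdown_by_title_alt
  dsimp only
  rw [pvFoldA_eq (pvIsCut levels) (PySem.Str.join "\n") (PySem.Str.splitlines text) [] []]
  rw [pvCutsInt_eq (pvIsCut levels) (PySem.Str.splitlines text) 0]
  have hb : (0 : Int) :: List.map (fun k : Nat => 0 + (k : Int))
        (pvCuts (pvIsCut levels) (PySem.Str.splitlines text)) ++
        [((PySem.Str.splitlines text).length : Int)] =
      ((0 :: pvCuts (pvIsCut levels) (PySem.Str.splitlines text) ++
        [(PySem.Str.splitlines text).length]).map (fun k : Nat => (k : Int))) := by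
    simp
  rw [hb, pvPInt_eq (PySem.Str.splitlines text), pvP_cuts, List.nil_append, pvRunA_nil_eq]
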